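-- pv_equiv track=rewrite | github.com/argilo/advent | 2017/10.py | permute
-- ===== SOURCE A (Python) =====
-- def permute(lengths):
--     lst_len = 256
--     lst = list(range(lst_len))
--     skip_size = 0
--     skipped = 0
--
--     for length in lengths:
--         lst = lst[:length][::-1] + lst[length:]
--         skip = (length + skip_size) % lst_len
--         lst = lst[skip:] + lst[:skip]
--         skipped = (skipped + skip) % lst_len
--         skip_size += 1
--
--     return lst[-skipped % lst_len:] + lst[:-skipped % lst_len]
-- ===== SOURCE B (Python) =====
-- def permute(lengths):
--     # Single-round knot hash with a position pointer: reverse each segment of the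
--     # circular list in place at `pos`, instead of rebuilding and rotating the
--     # whole list on every step and un-rotating at the end.
--     lst = list(range(256))
--     pos = 0
--     for skip_size, length in enumerate(lengths):
--         window = lst[pos:] + lst[:pos]
--         for i, v in enumerate(window[:length][::-1]):
--             lst[(pos + i) % 256] = v
--         pos = (pos + length + skip_size) % 256
--     return lst
-- ===== Notes on version B (the rewrite author's own statement) =====
-- stated objective: alternative
-- what changed: B keeps a position pointer and writes each reversed circular segment back in place, instead of A's rebuilding of the whole 256-list (slice-reverse-concatenate plus a full rotation) on every step and a final un-rotation via a skipped counter.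
import Mathlib
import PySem

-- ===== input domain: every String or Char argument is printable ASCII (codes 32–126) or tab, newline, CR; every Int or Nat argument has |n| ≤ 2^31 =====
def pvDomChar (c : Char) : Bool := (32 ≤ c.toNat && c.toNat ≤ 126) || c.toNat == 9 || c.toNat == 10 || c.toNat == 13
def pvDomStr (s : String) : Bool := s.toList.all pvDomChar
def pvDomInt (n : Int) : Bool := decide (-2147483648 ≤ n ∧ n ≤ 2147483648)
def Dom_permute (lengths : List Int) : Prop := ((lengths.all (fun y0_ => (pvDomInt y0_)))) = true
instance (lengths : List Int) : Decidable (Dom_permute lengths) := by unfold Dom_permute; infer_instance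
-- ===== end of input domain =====

-- B replaces A's per-step rebuild-and-rotate of the whole 256-list (and final
-- un-rotation) by a position pointer and an in-place write-back of each reversed
-- circular segment; same operation count, different structure.

-- ===== PORT A =====
-- one iteration of A's loop; state = (lst, skip_size, skipped)
def stepA (st : List Int × Int × Int) (length : Int) : List Int × Int × Int :=
  match st with
  | (lst, skip_size, skipped) =>
    -- lst = lst[:length][::-1] + lst[length:]
    let lst := (PySem.List.slice lst none (some length)).reverse ++ PySem.List.slice lst (some length) none
    let skip := PySem.Int.mod (length + skip_size) 256
    -- lst = lst[skip:] + lst[:skip]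
    let lst := PySem.List.slice lst (some skip) none ++ PySem.List.slice lst none (some skip)
    (lst, skip_size + 1, PySem.Int.mod (skipped + skip) 256)

def permute (lengths : List Int) : List Int :=
  let st := lengths.foldl stepA (PySem.List.pyRange 0 256, 0, 0)
  -- return lst[-skipped % lst_len:] + lst[:-skipped % lst_len]
  let m := PySem.Int.mod (-st.2.2) 256
  PySem.List.slice st.1 (some m) none ++ PySem.List.slice st.1 none (some m)

-- ===== PORT B =====
-- Source B's inner loop: for i, v in enumerate(seg): lst[(pos + i) % 256] = v
def writeBack (pos : Int) (lst seg : List Int) : List Int :=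
  (PySem.List.enumerate seg).foldl
    (fun l (iv : Int × Int) => PySem.List.pySetD l (PySem.Int.mod (pos + iv.1) 256) iv.2) lst

-- one iteration over enumerate(lengths); state = (lst, pos)
def stepB (st : List Int × Int) (p : Int × Int) : List Int × Int :=
  match st, p with
  | (lst, pos), (skip_size, length) =>
    -- window = lst[pos:] + lst[:pos]; seg = window[:length][::-1]
    let window := PySem.List.slice lst (some pos) none ++ PySem.List.slice lst none (some pos)
    let seg := (PySem.List.slice window none (some length)).reverse
    (writeBack pos lst seg, PySem.Int.mod (pos + length + skip_size) 256)

def permute_alt (lengths : List Int) : List Int :=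
  ((PySem.List.enumerate lengths).foldl stepB (PySem.List.pyRange 0 256, 0)).1

-- ===== PRECONDITION & SPEC =====
def Spec_permute (lengths : List Int) (out : List Int) : Prop := out = permute_alt lengths
instance (lengths : List Int) (out : List Int) : Decidable (Spec_permute lengths out) := by unfold Spec_permute; infer_instance

-- ===== CLAIM =====
def Claim_equal_permute : Prop := ∀ (lengths : List Int), Dom_permute lengths → Spec_permute lengths (permute lengths)

-- ===== LEMMAS AND PROOFS =====

-- pointwise extensionality for 256-lists, via getD
theorem eq_of_getD_256 (X Y : List Int) (hX : X.length = 256) (hY : Y.length = 256)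
    (h : ∀ j, j < 256 → X.getD j 0 = Y.getD j 0) : X = Y := by
  apply List.ext_getElem (by omega)
  intro i h1 h2
  have := h i (by omega)
  rwa [List.getD_eq_getElem?_getD, List.getD_eq_getElem?_getD,
    List.getElem?_eq_getElem h1, List.getElem?_eq_getElem h2] at this

-- rotation (drop ++ take) read pointwise
theorem rot_getD (X : List Int) (s j : Nat) (hX : X.length = 256) (hs : s ≤ 256) (hj : j < 256) :
    (X.drop s ++ X.take s).getD j 0 = X.getD ((s + j) % 256) 0 := by
  rw [List.getD_eq_getElem _ _ (by simp [hX]; omega),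
      List.getD_eq_getElem _ _ (by omega)]
  rw [List.getElem_append]
  split_ifs with h1
  · rw [List.getElem_drop]; congr 1; simp [hX] at h1 ⊢; omega
  · rw [List.getElem_take]; congr 1; simp [hX] at h1 ⊢; omega

-- prefix reversal read pointwise
theorem prefRev_getD (X : List Int) (eff j : Nat) (hX : X.length = 256) (he : eff ≤ 256) (hj : j < 256) :
    ((X.take eff).reverse ++ X.drop eff).getD j 0 = X.getD (if j < eff then eff - 1 - j else j) 0 := by
  rw [List.getD_eq_getElem _ _ (by simp [hX]; omega),
      List.getD_eq_getElem _ _ (by split_ifs <;> omega)]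
  rw [List.getElem_append]
  split_ifs with h1 h2 h3
  · rw [List.getElem_reverse, List.getElem_take]; congr 1; simp [hX] at h1 ⊢; omega
  · simp [hX] at h1; omega
  · simp [hX] at h1; omega
  · rw [List.getElem_drop]; congr 1; simp [hX] at h1 ⊢; omega

-- reversed prefix alone, read pointwise
theorem revTake_getD (X : List Int) (eff k : Nat) (hX : X.length = 256) (he : eff ≤ 256) (hk : k < eff) :
    ((X.take eff).reverse).getD k 0 = X.getD (eff - 1 - k) 0 := by
  rw [List.getD_eq_getElem _ _ (by simp [hX]; omega),
      List.getD_eq_getElem _ _ (by omega)]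
  rw [List.getElem_reverse, List.getElem_take]
  congr 1
  simp [hX]
  omega

theorem modA_toNat (pos : Int) (hp : 0 ≤ pos) (k : Nat) :
    (PySem.Int.mod (pos + (k : Int)) 256).toNat = (pos.toNat + k) % 256 := by
  rw [PySem.Int.mod_eq_emod_of_pos (by omega)]; omega

-- one list assignment read pointwise
theorem set_getD (lst : List Int) (h : lst.length = 256) (a : Nat) (v : Int)
    (_ : a < 256) (j : Nat) (hj : j < 256) :
    (lst.set a v).getD j 0 = if j = a then v else lst.getD j 0 := by
  rw [List.getD_eq_getElem _ _ (by simp [h]; omega),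
      List.getD_eq_getElem?_getD]
  rw [List.getElem_set]
  split_ifs with h1 h2 h3
  · rfl
  · omega
  · omega
  · rw [List.getElem?_eq_getElem (by omega)]; rfl

theorem length_writeBack_aux (pos : Int) (ps : List (Int × Int)) :
    ∀ lst : List Int,
      (ps.foldl (fun l (iv : Int × Int) => PySem.List.pySetD l (PySem.Int.mod (pos + iv.1) 256) iv.2) lst).length
        = lst.length := by
  induction ps with
  | nil => intro lst; rfl
  | cons p ps ih => intro lst; rw [List.foldl_cons, ih, PySem.List.length_pySetD]

theorem length_writeBack (pos : Int) (lst seg : List Int) :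
    (writeBack pos lst seg).length = lst.length := by
  unfold writeBack; exact length_writeBack_aux pos _ lst

-- the write-back loop, read pointwise (invariant over enumerate seg s)
theorem wb_getD (pos : Int) (hp : 0 ≤ pos ∧ pos < 256) :
    ∀ (seg : List Int) (s : Nat) (lst : List Int), lst.length = 256 →
      s + seg.length ≤ 256 →
      ∀ j, j < 256 →
      ((PySem.List.enumerate seg (s : Int)).foldl
          (fun l (iv : Int × Int) => PySem.List.pySetD l (PySem.Int.mod (pos + iv.1) 256) iv.2) lst).getD j 0
        = if s ≤ (j + 256 - pos.toNat) % 256 ∧ (j + 256 - pos.toNat) % 256 < s + seg.length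
          then seg.getD ((j + 256 - pos.toNat) % 256 - s) 0
          else lst.getD j 0 := by
  intro seg
  induction seg with
  | nil =>
    intro s lst h256 hb j hj
    rw [PySem.List.enumerate_nil, List.foldl_nil]
    rw [if_neg (by simp only [List.length_nil]; omega)]
  | cons v seg ih =>
    intro s lst h256 hb j hj
    simp only [List.length_cons] at hb
    rw [PySem.List.enumerate_cons, List.foldl_cons]
    have hcast : ((s : Int) + 1) = ((s + 1 : Nat) : Int) := by push_cast; ring
    rw [hcast]
    have hset : PySem.List.pySetD lst (PySem.Int.mod (pos + (s : Int)) 256) v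
        = lst.set ((pos.toNat + s) % 256) v := by
      rw [PySem.List.pySetD_of_nonneg _ _ (PySem.Int.mod_nonneg _ (by omega)),
        modA_toNat pos hp.1 s]
    rw [hset]
    rw [ih (s + 1) _ (by simp [h256]) (by omega) j hj]
    set d := (j + 256 - pos.toNat) % 256 with hd
    have hdlt : d < 256 := by omega
    have hjd : j = (pos.toNat + d) % 256 := by omega
    by_cases h1 : s + 1 ≤ d ∧ d < s + 1 + seg.length
    · rw [if_pos h1, if_pos (by simp only [List.length_cons]; omega)]
      have : d - s = (d - (s+1)) + 1 := by omega
      rw [this, List.getD_cons_succ]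
    · rw [if_neg h1]
      rw [set_getD lst h256 _ v (by omega) j hj]
      by_cases h2 : d = s
      · rw [if_pos (by omega), if_pos (by simp only [List.length_cons]; omega)]
        have : d - s = 0 := by omega
        rw [this, List.getD_cons_zero]
      · rw [if_neg (by omega), if_neg (by simp only [List.length_cons]; omega)]

-- B's step, list component read pointwise
theorem stepB_getD (l pos : Int) (c : Int) (hp : 0 ≤ pos ∧ pos < 256)
    (lst : List Int) (h256 : lst.length = 256) (j : Nat) (hj : j < 256) :
    (stepB (lst, pos) (c, l)).1.getD j 0 =
      lst.getD
        (if (j + 256 - pos.toNat) % 256 < PySem.List.clampIdx 256 l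
         then (pos.toNat + (PySem.List.clampIdx 256 l - 1 - (j + 256 - pos.toNat) % 256)) % 256
         else j) 0 := by
  have hcl := PySem.List.clampIdx_le 256 l
  simp only [stepB, writeBack]
  rw [PySem.List.slice_from _ hp.1, PySem.List.slice_to _ hp.1]
  have hwin : (lst.drop pos.toNat ++ lst.take pos.toNat).length = 256 := by
    simp [h256]; omega
  have hsl : PySem.List.slice (lst.drop pos.toNat ++ lst.take pos.toNat) none (some l)
      = (lst.drop pos.toNat ++ lst.take pos.toNat).take (PySem.List.clampIdx 256 l) := by
    simp [PySem.List.slice, hwin]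
  rw [hsl]
  have hseglen : (((lst.drop pos.toNat ++ lst.take pos.toNat).take (PySem.List.clampIdx 256 l)).reverse).length
      = PySem.List.clampIdx 256 l := by
    rw [List.length_reverse, List.length_take, hwin]; omega
  have h0 : ((0 : Nat) : Int) = (0 : Int) := by norm_num
  rw [show (PySem.List.enumerate ((((lst.drop pos.toNat ++ lst.take pos.toNat).take (PySem.List.clampIdx 256 l)).reverse)) : List (Int × Int))
      = PySem.List.enumerate (((lst.drop pos.toNat ++ lst.take pos.toNat).take (PySem.List.clampIdx 256 l)).reverse) ((0 : Nat) : Int) from by rw [h0]]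
  rw [wb_getD pos hp _ 0 lst h256 (by rw [hseglen]; omega) j hj]
  rw [hseglen]
  set d := (j + 256 - pos.toNat) % 256 with hd
  by_cases h1 : d < PySem.List.clampIdx 256 l
  · rw [if_pos (by omega), if_pos h1]
    have : d - 0 = d := by omega
    rw [this]
    rw [revTake_getD _ _ _ hwin (by omega) h1]
    rw [rot_getD lst pos.toNat _ h256 (by omega) (by omega)]
  · rw [if_neg (by omega), if_neg h1]

-- xs[:b] for arbitrary Int b (slice is defined as clamped drop/take)
theorem slice_none_some (xs : List Int) (b : Int) :
    PySem.List.slice xs none (some b) = xs.take (PySem.List.clampIdx xs.length b) := by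
  simp [PySem.List.slice]

-- A's step read pointwise
theorem stepA_getD (length c skipped : Int) (lstA : List Int)
    (hA : lstA.length = 256) (j : Nat) (hj : j < 256) :
    (stepA (lstA, c, skipped) length).1.getD j 0
      = lstA.getD
          (if ((PySem.Int.mod (length + c) 256).toNat + j) % 256 < PySem.List.clampIdx 256 length
           then PySem.List.clampIdx 256 length - 1 - (((PySem.Int.mod (length + c) 256).toNat + j) % 256)
           else ((PySem.Int.mod (length + c) 256).toNat + j) % 256) 0 := by
  have hsk := PySem.Int.mod_nonneg (length + c) (b := 256) (by omega)
  have hsklt := PySem.Int.mod_lt (length + c) (b := 256) (by omega)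
  have hcl := PySem.List.clampIdx_le 256 length
  simp only [stepA]
  rw [slice_none_some lstA length, PySem.List.slice_some_none lstA length, hA]
  have hX : ((lstA.take (PySem.List.clampIdx 256 length)).reverse
      ++ lstA.drop (PySem.List.clampIdx 256 length)).length = 256 := by
    simp [hA]
  rw [PySem.List.slice_from _ hsk, PySem.List.slice_to _ hsk]
  rw [rot_getD _ _ j hX (by omega) hj]
  rw [prefRev_getD lstA (PySem.List.clampIdx 256 length) _ hA (by omega) (by omega)]

theorem length_stepA (length c skipped : Int) (lstA : List Int)
    (hA : lstA.length = 256) :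
    (stepA (lstA, c, skipped) length).1.length = 256 := by
  have hsk := PySem.Int.mod_nonneg (length + c) (b := 256) (by omega)
  have hcl := PySem.List.clampIdx_le 256 length
  simp only [stepA]
  rw [slice_none_some lstA length, PySem.List.slice_some_none lstA length, hA]
  rw [PySem.List.slice_from _ hsk, PySem.List.slice_to _ hsk]
  have hsklt := PySem.Int.mod_lt (length + c) (b := 256) (by omega)
  rw [PySem.Int.mod_eq_emod_of_pos (by omega)] at hsk hsklt
  simp [hA]
  omega

-- main fold invariant: A's skipped counter equals B's position pointer, and
-- A's (rotated) list read at j is B's list read at skipped + j (mod 256)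
theorem fold_inv (rest : List Int) :
    ∀ (c skipped : Int) (lstA lstB : List Int),
      0 ≤ c →
      lstA.length = 256 → lstB.length = 256 →
      0 ≤ skipped → skipped < 256 →
      (∀ j, j < 256 → lstA.getD j 0 = lstB.getD ((skipped.toNat + j) % 256) 0) →
      (rest.foldl stepA (lstA, c, skipped)).1.length = 256 ∧
      ((PySem.List.enumerate rest c).foldl stepB (lstB, skipped)).1.length = 256 ∧
      (rest.foldl stepA (lstA, c, skipped)).2.2 = ((PySem.List.enumerate rest c).foldl stepB (lstB, skipped)).2 ∧
      0 ≤ (rest.foldl stepA (lstA, c, skipped)).2.2 ∧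
      (rest.foldl stepA (lstA, c, skipped)).2.2 < 256 ∧
      (∀ j, j < 256 →
        (rest.foldl stepA (lstA, c, skipped)).1.getD j 0 =
          ((PySem.List.enumerate rest c).foldl stepB (lstB, skipped)).1.getD
            (((rest.foldl stepA (lstA, c, skipped)).2.2.toNat + j) % 256) 0) := by
  induction rest with
  | nil =>
    intro c skipped lstA lstB hc hA hB hs0 hs1 hpt
    simp only [PySem.List.enumerate_nil, List.foldl_nil]
    exact ⟨hA, hB, trivial, hs0, hs1, hpt⟩
  | cons l rest ih =>
    intro c skipped lstA lstB hc hA hB hs0 hs1 hpt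
    rw [PySem.List.enumerate_cons, List.foldl_cons, List.foldl_cons]
    have hstepA : stepA (lstA, c, skipped) l
        = ((stepA (lstA, c, skipped) l).1, c + 1,
            PySem.Int.mod (skipped + PySem.Int.mod (l + c) 256) 256) := by
      simp [stepA]
    have hstepB : stepB (lstB, skipped) (c, l)
        = ((stepB (lstB, skipped) (c, l)).1, PySem.Int.mod (skipped + l + c) 256) := by
      simp [stepB]
    have hposeq : PySem.Int.mod (skipped + l + c) 256
        = PySem.Int.mod (skipped + PySem.Int.mod (l + c) 256) 256 := by
      rw [PySem.Int.mod_eq_emod_of_pos (b := 256) (by omega),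
        PySem.Int.mod_eq_emod_of_pos (b := 256) (by omega),
        PySem.Int.mod_eq_emod_of_pos (b := 256) (by omega)]
      omega
    rw [hstepA, hstepB, hposeq]
    have hsk := PySem.Int.mod_nonneg (l + c) (b := 256) (by omega)
    have hsklt := PySem.Int.mod_lt (l + c) (b := 256) (by omega)
    have hsk2 := PySem.Int.mod_nonneg (skipped + PySem.Int.mod (l + c) 256) (b := 256) (by omega)
    have hsk2lt := PySem.Int.mod_lt (skipped + PySem.Int.mod (l + c) 256) (b := 256) (by omega)
    have hBstep : (stepB (lstB, skipped) (c, l)).1.length = 256 := by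
      simp only [stepB]
      rw [length_writeBack]
      exact hB
    apply ih (c + 1) _ _ _ (by omega)
      (length_stepA l c skipped lstA hA) hBstep hsk2 hsk2lt
    -- the pointwise invariant is preserved by one step
    intro j hj
    rw [stepA_getD l c skipped lstA hA j hj]
    have hcl := PySem.List.clampIdx_le 256 l
    have hσ : (if ((PySem.Int.mod (l + c) 256).toNat + j) % 256 < PySem.List.clampIdx 256 l
           then PySem.List.clampIdx 256 l - 1 - (((PySem.Int.mod (l + c) 256).toNat + j) % 256)
           else ((PySem.Int.mod (l + c) 256).toNat + j) % 256) < 256 := by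
      split_ifs <;> omega
    rw [hpt _ hσ]
    have hj' : ((PySem.Int.mod (skipped + PySem.Int.mod (l + c) 256) 256).toNat + j) % 256 < 256 := by
      omega
    rw [stepB_getD l skipped c ⟨hs0, hs1⟩ lstB hB _ hj']
    have key : ∀ x y : Nat, x = y → lstB.getD x 0 = lstB.getD y 0 := fun x y h => by rw [h]
    apply key
    -- pure modular index bookkeeping
    have e1 : (PySem.Int.mod (skipped + PySem.Int.mod (l + c) 256) 256).toNat
        = (skipped.toNat + (PySem.Int.mod (l + c) 256).toNat) % 256 := by
      rw [PySem.Int.mod_eq_emod_of_pos (by omega)]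
      omega
    rw [e1]
    generalize (PySem.Int.mod (l + c) 256).toNat = s at *
    generalize hgp : skipped.toNat = pd at *
    generalize PySem.List.clampIdx 256 l = eff at *
    have hpd : pd < 256 := by omega
    by_cases ht : (s + j) % 256 < eff
    · rw [if_pos ht]
      rw [if_pos (by omega : (((pd + s) % 256 + j) % 256 + 256 - pd) % 256 < eff)]
      omega
    · rw [if_neg ht]
      rw [if_neg (by omega : ¬ (((pd + s) % 256 + j) % 256 + 256 - pd) % 256 < eff)]
      omega

-- ===== VERDICT (by name: the statement is the Claim_ definition above) =====
theorem permute_spec : Claim_equal_permute := by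
  intro lengths _
  unfold Spec_permute permute permute_alt
  dsimp only
  have hinit : (PySem.List.pyRange 0 256).length = 256 := by
    rw [PySem.List.length_pyRange_one]; rfl
  have hpt0 : ∀ j, j < 256 →
      (PySem.List.pyRange 0 256).getD j 0
        = (PySem.List.pyRange 0 256).getD (((0 : Int).toNat + j) % 256) 0 := by
    intro j hj
    have : ((0 : Int).toNat + j) % 256 = j := by omega
    rw [this]
  obtain ⟨hA, hB, hpos, hs0, hs1, hpt⟩ :=
    fold_inv lengths 0 0 _ _ (by omega) hinit hinit (by omega) (by omega) hpt0
  have hm := PySem.Int.mod_nonneg (-(lengths.foldl stepA (PySem.List.pyRange 0 256, 0, 0)).2.2) (b := 256) (by omega)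
  have hmlt := PySem.Int.mod_lt (-(lengths.foldl stepA (PySem.List.pyRange 0 256, 0, 0)).2.2) (b := 256) (by omega)
  rw [PySem.List.slice_from _ hm, PySem.List.slice_to _ hm]
  apply eq_of_getD_256
  · simp [hA]; omega
  · exact hB
  · intro j hj
    rw [rot_getD _ _ j hA (by omega) hj]
    rw [hpt _ (by omega)]
    have key : ∀ (L : List Int) (x y : Nat), x = y → L.getD x 0 = L.getD y 0 :=
      fun L x y h => by rw [h]
    apply key
    have hmn : (PySem.Int.mod (-(lengths.foldl stepA (PySem.List.pyRange 0 256, 0, 0)).2.2) 256).toNat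
        = (256 - (lengths.foldl stepA (PySem.List.pyRange 0 256, 0, 0)).2.2.toNat) % 256 := by
      rw [PySem.Int.mod_eq_emod_of_pos (by omega)]
      omega
    rw [hmn]
    omega
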